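-- pv_equiv track=rewrite | github.com/weijuly/ds-algo-py | puzzles/test_permutations.py | permutations_of_length
-- ===== SOURCE A (Python) =====
-- def permute(sequence):
--     if len(sequence) == 0:
--         return []
--     if len(sequence) == 1:
--         return [sequence]
--     head, *tail = sequence
--     permutations = []
--     for x in permute(tail):
--         permutations.extend([x[:i] + [head] + x[i:] for i in range(len(x) + 1)])
--     return permutations
--
-- def permutations_of_length(seq, l):
--     if l == 0 or l > len(seq):
--         return []
--     permutations = []
--     for x in permute(seq):
--         if x[:l] not in permutations:
--             permutations.append(x[:l])
--     return permutations
-- ===== SOURCE B (Python) =====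
-- def permutations_of_length(seq, l):
--     if l == 0 or l > len(seq):
--         return []
--     if not seq:
--         return []
--     # build all permutations iteratively: insert elements right-to-left
--     perms = [[seq[-1]]]
--     for h in reversed(seq[:-1]):
--         perms = [x[:i] + [h] + x[i:] for x in perms for i in range(len(x) + 1)]
--     # collect distinct length-l prefixes in first-occurrence order (set lookup)
--     out, seen = [], set()
--     for x in perms:
--         p = tuple(x[:l])
--         if p not in seen:
--             seen.add(p)
--             out.append(list(p))
--     return out
-- ===== Notes on version B (the rewrite author's own statement) =====
-- stated objective: alternative
-- what changed: Replaces the recursive permutation generator with an iterative right-to-left insertion loop producing the identical generation order, and replaces the quadratic list-membership dedup with a set-based seen check.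
import Mathlib
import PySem

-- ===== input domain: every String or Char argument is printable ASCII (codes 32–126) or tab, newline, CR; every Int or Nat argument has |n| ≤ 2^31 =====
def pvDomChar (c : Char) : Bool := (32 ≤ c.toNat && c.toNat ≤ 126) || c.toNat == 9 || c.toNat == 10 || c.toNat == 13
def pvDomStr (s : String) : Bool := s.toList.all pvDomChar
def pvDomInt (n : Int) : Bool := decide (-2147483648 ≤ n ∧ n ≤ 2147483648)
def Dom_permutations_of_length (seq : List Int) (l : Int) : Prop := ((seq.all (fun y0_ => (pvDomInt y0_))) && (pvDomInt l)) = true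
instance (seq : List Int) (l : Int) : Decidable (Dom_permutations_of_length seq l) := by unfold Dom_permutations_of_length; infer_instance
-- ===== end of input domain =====

-- B builds the permutations iteratively (right-to-left insertion loop) instead of recursively,
-- and dedups the prefixes with a set instead of scanning the output list; same return value.

-- ===== PORT A =====
-- permute: recursive; 'x[:i] + [head] + x[i:]' for natural i ≤ len x is exactly take/drop
def permuteA : List Int → List (List Int)
  | [] => []
  | [x] => [[x]]
  | h :: t :: ts =>
    (permuteA (t :: ts)).foldl
      (fun acc x =>
        acc ++ (List.range (x.length + 1)).map (fun i => x.take i ++ [h] ++ x.drop i))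
      []

def permutations_of_length (seq : List Int) (l : Int) : List (List Int) :=
  if l = 0 ∨ l > (seq.length : Int) then []
  else
    (permuteA seq).foldl
      (fun acc x =>
        if PySem.List.slice x none (some l) ∈ acc then acc
        else acc ++ [PySem.List.slice x none (some l)])
      []

-- ===== PORT B =====
-- one pass of B's inner comprehension: insert h at every position of every current permutation
def stepB (h : Int) (perms : List (List Int)) : List (List Int) :=
  perms.flatMap (fun x => (List.range (x.length + 1)).map (fun i => x.take i ++ [h] ++ x.drop i))

-- tuple(x[:l]) / list(p) in Source B are hashability conversions only; the Lean value is the list itself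
def permutations_of_length_alt (seq : List Int) (l : Int) : List (List Int) :=
  if l = 0 ∨ l > (seq.length : Int) then []
  else
    match seq.getLast? with
    | none => []
    | some lst =>
      let perms := (PySem.List.slice seq none (some (-1))).reverse.foldl
        (fun ps h => stepB h ps) [[lst]]
      (perms.foldl
        (fun (st : List (List Int) × PySem.Set (List Int)) x =>
          let p := PySem.List.slice x none (some l)
          if PySem.Set.contains st.2 p then st
          else (st.1 ++ [p], PySem.Set.add st.2 p))
        ([], PySem.Set.empty)).1

-- ===== PRECONDITION & SPEC =====
def Spec_permutations_of_length (seq : List Int) (l : Int) (out : List (List Int)) : Prop := out = permutations_of_length_alt seq l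
instance (seq : List Int) (l : Int) (out : List (List Int)) : Decidable (Spec_permutations_of_length seq l out) := by unfold Spec_permutations_of_length; infer_instance

-- ===== CLAIM (what is proved, stated in full; the proofs are below) =====
def Claim_equal_permutations_of_length : Prop := ∀ (seq : List Int) (l : Int), Dom_permutations_of_length seq l → Spec_permutations_of_length seq l (permutations_of_length seq l)

-- ===== LEMMAS AND PROOFS =====

theorem permuteA_cons (h t : Int) (ts : List Int) :
    permuteA (h :: t :: ts) = stepB h (permuteA (t :: ts)) := by
  rw [permuteA, PySem.List.foldl_append_eq_flatMap]
  rfl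

theorem permuteA_eq_iter (seq : List Int) (lst : Int) (hl : seq.getLast? = some lst) :
    permuteA seq = seq.dropLast.reverse.foldl (fun ps h => stepB h ps) [[lst]] := by
  simp only [List.foldl_reverse]
  induction seq with
  | nil => simp at hl
  | cons h t ih =>
    match t with
    | [] =>
      simp at hl
      subst hl
      rfl
    | a :: ts =>
      have hl' : (a :: ts).getLast? = some lst := by
        rw [List.getLast?_cons_cons] at hl; exact hl
      rw [permuteA_cons, ih hl']
      simp [List.dropLast_cons_of_ne_nil]

theorem dedup_eq (ps : List (List Int)) (l : Int) (acc : List (List Int))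
    (seen : PySem.Set (List Int)) (hinv : ∀ p, PySem.Set.contains seen p = decide (p ∈ acc)) :
    ps.foldl
      (fun acc x =>
        if PySem.List.slice x none (some l) ∈ acc then acc
        else acc ++ [PySem.List.slice x none (some l)]) acc
    = (ps.foldl
        (fun (st : List (List Int) × PySem.Set (List Int)) x =>
          let p := PySem.List.slice x none (some l)
          if PySem.Set.contains st.2 p then st
          else (st.1 ++ [p], PySem.Set.add st.2 p)) (acc, seen)).1 := by
  induction ps generalizing acc seen with
  | nil => rfl
  | cons x ps ih =>
    simp only [List.foldl_cons]
    have hc := hinv (PySem.List.slice x none (some l))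
    by_cases hm : PySem.List.slice x none (some l) ∈ acc
    · have hb : PySem.Set.contains seen (PySem.List.slice x none (some l)) = true := by
        rw [hc]; exact decide_eq_true hm
      simp only [hm, hb, if_pos]
      exact ih acc seen hinv
    · have hb : PySem.Set.contains seen (PySem.List.slice x none (some l)) = false := by
        rw [hc]; exact decide_eq_false hm
      simp only [hm, hb, if_neg, Bool.false_eq_true, not_false_iff]
      refine ih _ _ ?_
      intro p
      have hs : PySem.List.slice x none (some l) ∉ seen := by
        intro h
        have := hinv (PySem.List.slice x none (some l))
        simp [PySem.Set.contains, h, hm] at this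
      have hq : decide (p ∈ seen) = decide (p ∈ acc) := by
        rw [← hinv p]; simp [PySem.Set.contains]
      simp [PySem.Set.add, PySem.Set.contains, hs, List.mem_append, hq]

-- ===== VERDICT (by name: the statement is the Claim_ definition above) =====
theorem permutations_of_length_spec : Claim_equal_permutations_of_length := by
  intro seq l _
  unfold Spec_permutations_of_length permutations_of_length permutations_of_length_alt
  split
  · rfl
  · match hL : seq.getLast? with
    | none =>
      simp at hL
      subst hL
      rfl
    | some lst =>
      simp only [PySem.List.slice_to_neg_one]
      rw [permuteA_eq_iter seq lst hL]
      exact dedup_eq _ l [] PySem.Set.empty (by intro p; rfl)
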